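-- pv_equiv track=rewrite | github.com/euler1337/advent_of_code_2019 | 12/program.py | calcualte_delta_v
-- ===== SOURCE A (Python) =====
-- DELTA_V_MAP = {}
--
-- def calcualte_delta_v(coords):
--
--     hashed = str(coords)
--     if hashed in DELTA_V_MAP:
--         delta_v =  DELTA_V_MAP[hashed]
--     else:
--         delta_v = []
--         for c1 in coords:
--             delta = 0
--             for c2 in coords:
--
--                 if c1 > c2:
--                     delta = delta - 1
--                 elif c1 < c2:
--                     delta = delta + 1
--             delta_v.append(delta)
--
--         hashed = str(coords)
--         DELTA_V_MAP[hashed] = delta_v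
--
--     return delta_v
-- ===== SOURCE B (Python) =====
-- def _bisect_left(a, x):
--     lo, hi = 0, len(a)
--     while lo < hi:
--         mid = (lo + hi) // 2
--         if a[mid] < x:
--             lo = mid + 1
--         else:
--             hi = mid
--     return lo
--
--
-- def _bisect_right(a, x):
--     lo, hi = 0, len(a)
--     while lo < hi:
--         mid = (lo + hi) // 2
--         if x < a[mid]:
--             hi = mid
--         else:
--             lo = mid + 1
--     return lo
--
--
-- def calcualte_delta_v(coords):
--     srt = sorted(coords)
--     n = len(srt)
--     return [(n - _bisect_right(srt, c)) - _bisect_left(srt, c) for c in coords]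
-- ===== Notes on version B (the rewrite author's own statement) =====
-- stated objective: faster
-- what changed: replaces the nested O(n^2) pairwise comparison with sorting the list once and using binary search (bisect_left/bisect_right) to count smaller and greater elements per coordinate
import Mathlib
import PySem

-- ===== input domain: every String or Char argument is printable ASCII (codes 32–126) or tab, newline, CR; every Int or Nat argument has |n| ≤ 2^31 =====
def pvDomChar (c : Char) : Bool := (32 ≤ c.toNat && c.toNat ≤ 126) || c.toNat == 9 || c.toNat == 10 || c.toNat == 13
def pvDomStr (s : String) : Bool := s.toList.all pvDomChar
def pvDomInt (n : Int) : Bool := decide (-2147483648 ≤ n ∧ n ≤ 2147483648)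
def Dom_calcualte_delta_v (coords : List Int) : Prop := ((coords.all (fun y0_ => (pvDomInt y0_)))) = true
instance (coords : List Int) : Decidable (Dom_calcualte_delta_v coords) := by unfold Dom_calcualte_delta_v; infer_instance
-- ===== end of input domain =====

-- B sorts once and counts smaller/greater elements by binary search instead of A's nested scan;
-- equivalence is about the return value only (A additionally memoises results in a module-level dict, which does not change the value).

-- ===== PORT A =====
-- (the DELTA_V_MAP cache only stores already-computed results; the returned value is the freshly computed list, ported here)
def calcualte_delta_v (coords : List Int) : List Int :=
  coords.foldl (fun delta_v c1 =>
    delta_v ++ [coords.foldl (fun delta c2 =>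
      if c1 > c2 then delta - 1 else if c1 < c2 then delta + 1 else delta) 0]) []

-- ===== PORT B =====
-- Source B's hand-written _bisect_left/_bisect_right are the standard bisect algorithms, ported as PySem.List.bisectLeft/bisectRight
def calcualte_delta_v_alt (coords : List Int) : List Int :=
  let srt := PySem.List.sorted coords (fun x => x) false
  let n : Int := srt.length
  coords.map (fun c => (n - PySem.List.bisectRight srt c) - PySem.List.bisectLeft srt c)

-- ===== PRECONDITION & SPEC =====
def Spec_calcualte_delta_v (coords : List Int) (out : List Int) : Prop := out = calcualte_delta_v_alt coords
instance (coords : List Int) (out : List Int) : Decidable (Spec_calcualte_delta_v coords out) := by unfold Spec_calcualte_delta_v; infer_instance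

-- ===== CLAIM (what is proved, stated in full; the proofs are below) =====
def Claim_equal_calcualte_delta_v : Prop := ∀ (coords : List Int), Dom_calcualte_delta_v coords → Spec_calcualte_delta_v coords (calcualte_delta_v coords)

-- ===== LEMMAS AND PROOFS =====

-- a predicate that holds exactly on the first k positions of a list is satisfied by exactly k elements
lemma countP_eq_of_cut (p : Int → Bool) :
    ∀ (l : List Int) (k : Nat), k ≤ l.length →
      (∀ j (hj : j < l.length), (j < k ↔ p l[j])) → l.countP p = k := by
  intro l
  induction l with
  | nil => intro k hk _; simp at hk ⊢; omega
  | cons a t ih =>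
    intro k hk hiff
    cases k with
    | zero =>
      have hz : ∀ x ∈ a :: t, ¬ p x := by
        intro x hx
        obtain ⟨j, hj, rfl⟩ := List.mem_iff_getElem.mp hx
        have := (hiff j hj).mpr
        intro hp; exact absurd (this hp) (by omega)
      simpa using List.countP_eq_zero.mpr hz
    | succ k' =>
      have hpa : p a := (hiff 0 (by simp)).mp (by omega)
      have ht : t.countP p = k' := by
        refine ih k' (by simpa using hk) ?_
        intro j hj
        have := hiff (j + 1) (by simpa using Nat.succ_lt_succ hj)
        simpa [Nat.succ_lt_succ_iff] using this
      simp [hpa, ht]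

-- inner loop of A counts (#greater) − (#less)
lemma inner_foldl_eq (c1 : Int) :
    ∀ (l : List Int) (d : Int),
      l.foldl (fun delta c2 =>
        if c1 > c2 then delta - 1 else if c1 < c2 then delta + 1 else delta) d
      = d + (l.countP (fun c2 => decide (c1 < c2)) : Int)
          - (l.countP (fun c2 => decide (c2 < c1)) : Int) := by
  intro l
  induction l with
  | nil => intro d; simp
  | cons a t ih =>
    intro d
    simp only [List.foldl_cons, List.countP_cons, ih]
    split_ifs with h1 h2 <;> simp_all <;> omega

-- per element, bisect counts on the sorted list equal the pairwise counts on the original list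
lemma pointwise_eq (coords : List Int) (c : Int) :
    ((PySem.List.sorted coords (fun x => x) false).length : Int)
        - PySem.List.bisectRight (PySem.List.sorted coords (fun x => x) false) c
        - PySem.List.bisectLeft (PySem.List.sorted coords (fun x => x) false) c
    = (coords.countP (fun c2 => decide (c < c2)) : Int)
        - (coords.countP (fun c2 => decide (c2 < c)) : Int) := by
  set srt := PySem.List.sorted coords (fun x => x) false with hsrt
  have hperm : srt.Perm coords := PySem.List.sorted_perm coords (fun x => x) false
  have hpw : srt.Pairwise (· ≤ ·) := by
    simpa using PySem.List.sorted_pairwise (key := fun x : Int => x) (xs := coords)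
  obtain ⟨hl₁, hl₂, hl₃⟩ := PySem.List.bisectLeft_spec srt c hpw
  obtain ⟨hr₁, hr₂, hr₃⟩ := PySem.List.bisectRight_spec srt c hpw
  have hlt : srt.countP (fun c2 => decide (c2 < c)) = PySem.List.bisectLeft srt c := by
    refine countP_eq_of_cut _ srt _ hl₁ ?_
    intro j hj
    constructor
    · intro h; simpa using hl₂ j hj h
    · intro h
      by_contra hnot
      have := hl₃ j hj (by omega)
      simp at h; omega
  have hgt : srt.countP (fun c2 => decide (c < c2))
      = srt.length - PySem.List.bisectRight srt c := by
    have hnot : srt.countP (fun c2 => decide (¬ c < c2)) = PySem.List.bisectRight srt c := by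
      refine countP_eq_of_cut _ srt _ hr₁ ?_
      intro j hj
      constructor
      · intro h; simpa using hr₂ j hj h
      · intro h
        by_contra hnot
        have := hr₃ j hj (by omega)
        simp at h; omega
    have hsum := List.length_eq_countP_add_countP (l := srt) (p := fun c2 => decide (c < c2))
    simp only [decide_not, decide_eq_true_eq] at hnot hsum
    omega
  rw [← hperm.countP_eq (fun c2 => decide (c < c2)), ← hperm.countP_eq (fun c2 => decide (c2 < c)),
    hlt, hgt]
  push_cast [Nat.cast_sub hr₁]
  ring

-- A's outer foldl over `acc ++ [·]` is a map
lemma foldl_append_singleton (f : Int → Int) :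
    ∀ (l : List Int) (acc : List Int),
      l.foldl (fun a c => a ++ [f c]) acc = acc ++ l.map f := by
  intro l
  induction l with
  | nil => intro acc; simp
  | cons a t ih => intro acc; simp [ih]

-- ===== VERDICT (by name: the statement is the Claim_ definition above) =====
theorem calcualte_delta_v_spec : Claim_equal_calcualte_delta_v := by
  intro coords _
  unfold Spec_calcualte_delta_v calcualte_delta_v calcualte_delta_v_alt
  rw [foldl_append_singleton]
  simp only [List.nil_append]
  apply List.map_congr_left
  intro c _
  rw [inner_foldl_eq, pointwise_eq]
  ring
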